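-- pv_equiv track=rewrite | github.com/pypi-data/pypi-mirror-234 | packages/crypto-screening/crypto-screening-8.12.1.tar.gz/crypto-screening-8.12.1/crypto_screening/utils/process.py | mutual_string_values
-- ===== SOURCE A (Python) =====
-- from typing import Iterable, List, Set, Optional, Dict
--
-- def mutual_string_values(
--         data: Dict[str, Iterable[str]],
--         minimum: Optional[int] = None,
--         maximum: Optional[int] = None
-- ) -> Dict[str, Set[str]]:
--     """
--     Collects the symbols from the exchanges.
--
--     :param data: The exchanges' data.
--     :param minimum: The minimum amount of counts for a value.
--     :param maximum: The maximum amount of counts for a value.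
--
--     :return: The data of the exchanges.
--     """
--
--     if minimum is None:
--         minimum = 2
--     # end if
--
--     if maximum is None:
--         maximum = len(data) * max(len(list(values)) for values in data.values()) + 1
--     # end if
--
--     values = {}
--
--     for key in data:
--         for value in data[key]:
--             values[value] = values.setdefault(value, 0) + 1
--         # end for
--     # end for
--
--     return {
--         key: {
--             value for value in data[key]
--             if minimum <= values.get(value, 0) <= maximum
--         } for key in data
--     }
-- ===== SOURCE B (Python) =====
-- def mutual_string_values(data, minimum=None, maximum=None):
--     """Sort-then-scan: sort all values once, read off each value's total count as the
--     length of its maximal run in the sorted pool, collect the accepted values from the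
--     runs, and filter each key's values by membership."""
--     if minimum is None:
--         minimum = 2
--     if maximum is None:
--         maximum = len(data) * max(len(list(values)) for values in data.values()) + 1
--     pool = sorted(v for vs in data.values() for v in vs)
--     accepted = set()
--     while pool:
--         head = pool[0]
--         run = 1
--         while run < len(pool) and pool[run] == head:
--             run += 1
--         if minimum <= run <= maximum:
--             accepted.add(head)
--         pool = pool[run:]
--     return {key: {v for v in data[key] if v in accepted} for key in data}
-- ===== Notes on version B (the rewrite author's own statement) =====
-- stated objective: alternative
-- what changed: B replaces A's hash-map counting pass with sort-then-scan: it sorts all values into one pool, reads each value's total count as the length of its maximal run while scanning the sorted pool once, collects the accepted values from those runs, and filters each key's values by membership; Pre_ excludes the empty-data/None-maximum case (both programs raise ValueError there) and association lists with duplicate keys, which do not represent a Python dict input.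
import Mathlib
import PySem

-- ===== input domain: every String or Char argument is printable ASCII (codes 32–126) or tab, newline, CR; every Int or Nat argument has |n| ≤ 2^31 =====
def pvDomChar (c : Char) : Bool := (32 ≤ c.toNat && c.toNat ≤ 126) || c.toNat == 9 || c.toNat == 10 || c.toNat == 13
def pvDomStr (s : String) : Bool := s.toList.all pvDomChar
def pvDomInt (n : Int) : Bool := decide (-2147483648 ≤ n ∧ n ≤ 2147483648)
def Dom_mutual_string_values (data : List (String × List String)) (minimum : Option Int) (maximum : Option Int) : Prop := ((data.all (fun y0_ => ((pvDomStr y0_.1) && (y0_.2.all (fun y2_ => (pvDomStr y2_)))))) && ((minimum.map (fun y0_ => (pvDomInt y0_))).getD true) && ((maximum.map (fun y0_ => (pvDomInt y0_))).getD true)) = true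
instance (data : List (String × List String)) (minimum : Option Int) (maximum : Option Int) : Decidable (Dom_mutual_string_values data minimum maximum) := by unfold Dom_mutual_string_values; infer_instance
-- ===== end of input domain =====

-- B replaces A's hash-map counting pass with sort-then-scan: one sorted pool whose
-- maximal runs give the counts, an accepted set read off the runs, then per-key
-- membership filtering (objective: alternative algorithm, same results).

-- ===== PORT A =====
def mutual_string_values (data : List (String × List String)) (minimum : Option Int) (maximum : Option Int) : List (String × List String) :=
  let mn : Int := minimum.getD 2
  -- maximum default: len(data) * max(len(values) for values in data.values()) + 1;
  -- the `.getD 0` arm of max? is the empty generator, where Python raises ValueError (outside Pre_)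
  let mx : Int := match maximum with
    | some m => m
    | none => (data.length : Int) *
        ((PySem.List.max? (data.map (fun kv => (kv.2.length : Int))) (fun x => x)).getD 0) + 1
  -- values[value] = values.setdefault(value, 0) + 1, nested over keys then data[key]
  let values : PySem.Dict String Int := data.foldl (fun d kv =>
      kv.2.foldl (fun d v =>
        let d' := d.setdefault v 0
        d'.insert v (d'.getD v 0 + 1)) d) PySem.Dict.empty
  data.map (fun kv => (kv.1,
    PySem.Set.ofList (kv.2.filter (fun v =>
      decide (mn ≤ values.getD v 0) && decide (values.getD v 0 ≤ mx)))))

-- ===== PORT B =====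
-- the while loop over the sorted pool: head = pool[0]; the inner while advances run to
-- 1 + length of the maximal prefix of the tail equal to head (exact transcription of the
-- index loop); then pool = pool[run:] = the tail with that prefix dropped
def pvRuns (mn mx : Int) (pool : List String) (acc : PySem.Set String) : PySem.Set String :=
  match pool with
  | [] => acc
  | head :: rest =>
    let run : Int := 1 + ((rest.takeWhile (fun v => v == head)).length : Int)
    let acc' := if mn ≤ run ∧ run ≤ mx then PySem.Set.add acc head else acc
    pvRuns mn mx (rest.dropWhile (fun v => v == head)) acc'
termination_by pool.length
decreasing_by
  have := List.length_dropWhile_le (fun v => v == head) rest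
  simp; omega

def mutual_string_values_alt (data : List (String × List String)) (minimum : Option Int) (maximum : Option Int) : List (String × List String) :=
  let mn : Int := minimum.getD 2
  let mx : Int := match maximum with
    | some m => m
    | none => (data.length : Int) *
        ((PySem.List.max? (data.map (fun kv => (kv.2.length : Int))) (fun x => x)).getD 0) + 1
  -- pool = sorted(v for vs in data.values() for v in vs)
  let pool : List String := PySem.List.sorted (data.flatMap (fun kv => kv.2)) (fun v => v) false
  let accepted : PySem.Set String := pvRuns mn mx pool PySem.Set.empty
  data.map (fun kv => (kv.1,
    PySem.Set.ofList (kv.2.filter (fun v => PySem.Set.contains accepted v))))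

-- ===== PRECONDITION & SPEC =====
-- Pre_ excludes (a) inputs where maximum is None and data is empty, on which A (and B)
-- raises ValueError (max() of an empty generator), and (b) association lists with
-- duplicate keys, which do not correspond to a Python dict input.
def Pre_mutual_string_values (data : List (String × List String)) (minimum : Option Int) (maximum : Option Int) : Prop :=
  (maximum = none → data ≠ []) ∧ (data.map Prod.fst).Nodup
instance (data : List (String × List String)) (minimum : Option Int) (maximum : Option Int) : Decidable (Pre_mutual_string_values data minimum maximum) := by unfold Pre_mutual_string_values; infer_instance

def pvWitness_mutual_string_values : (List (String × List String)) × Option Int × Option Int :=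
  ([("x", ["a", "a"]), ("y", ["a", "b"])], none, none)

def Spec_mutual_string_values (data : List (String × List String)) (minimum : Option Int) (maximum : Option Int) (out : List (String × List String)) : Prop := out = mutual_string_values_alt data minimum maximum
instance (data : List (String × List String)) (minimum : Option Int) (maximum : Option Int) (out : List (String × List String)) : Decidable (Spec_mutual_string_values data minimum maximum out) := by unfold Spec_mutual_string_values; infer_instance

-- ===== CLAIM (what is proved, stated in full; the proofs are below) =====
def Claim_equal_mutual_string_values : Prop := ∀ (data : List (String × List String)) (minimum : Option Int) (maximum : Option Int), Dom_mutual_string_values data minimum maximum → Pre_mutual_string_values data minimum maximum → Spec_mutual_string_values data minimum maximum (mutual_string_values data minimum maximum)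

-- ===== LEMMAS AND PROOFS =====

-- A's setdefault-then-overwrite counting step is the plain insert counting step
theorem pv_step_eq (d : PySem.Dict String Int) (v : String) :
    (let d' := d.setdefault v 0; d'.insert v (d'.getD v 0 + 1)) = d.insert v (d.getD v 0 + 1) := by
  by_cases h : d.contains v = true
  · simp [PySem.Dict.setdefault_of_contains d 0 h]
  · have h' : d.contains v = false := by simpa using h
    simp [PySem.Dict.setdefault_of_not_contains d 0 h',
      PySem.Dict.getD_insert_self, PySem.Dict.insert_insert_self,
      PySem.Dict.getD_of_not_contains d 0 h']

-- a nested fold over the rows is the fold over the flattened values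
theorem pv_foldl_flat {α : Type} (f : PySem.Dict String Int → α → PySem.Dict String Int)
    (data : List (String × List α)) (init : PySem.Dict String Int) :
    data.foldl (fun d kv => kv.2.foldl f d) init = (data.flatMap (fun kv => kv.2)).foldl f init := by
  induction data generalizing init with
  | nil => rfl
  | cons kv rest ih => simp [List.flatMap_cons, List.foldl_append, ih]

-- in an ordered tail, dropping head's run removes ALL remaining occurrences of head
theorem pv_head_not_mem_dropWhile (head : String) (rest : List String)
    (hp : rest.Pairwise (· ≤ ·)) (hle : ∀ y ∈ rest, head ≤ y) :
    head ∉ rest.dropWhile (fun v => v == head) := by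
  induction rest with
  | nil => simp
  | cons x t ih =>
    rw [List.pairwise_cons] at hp
    by_cases hx : x = head
    · subst hx
      simp only [List.dropWhile_cons, beq_self_eq_true, if_pos]
      exact ih hp.2 (fun y hy => hp.1 y hy)
    · have hxh : (x == head) = false := by simp [hx]
      simp only [List.dropWhile_cons, hxh, Bool.false_eq_true, if_neg, not_false_eq_true]
      intro hmem
      rcases List.mem_cons.mp hmem with h | h
      · exact hx h.symm
      · have h1 : head < x :=
          lt_of_le_of_ne (hle x List.mem_cons_self) (fun he => hx he.symm)
        exact absurd (lt_of_lt_of_le h1 (hp.1 head h)) (lt_irrefl _)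

-- the run scan over a sorted pool accepts exactly the pool's values whose count is in range
theorem pv_mem_pvRuns (mn mx : Int) : ∀ (n : Nat) (pool : List String), pool.length ≤ n →
    ∀ (acc : PySem.Set String), pool.Pairwise (· ≤ ·) → ∀ (v : String),
    (v ∈ pvRuns mn mx pool acc ↔
      v ∈ acc ∨ (v ∈ pool ∧ mn ≤ (pool.count v : Int) ∧ (pool.count v : Int) ≤ mx)) := by
  intro n
  induction n with
  | zero =>
    intro pool hlen acc _ v
    have : pool = [] := List.length_eq_zero_iff.mp (Nat.le_zero.mp hlen)
    subst this
    simp [pvRuns]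
  | succ n ih =>
    intro pool hlen acc hs v
    match pool with
    | [] => simp [pvRuns]
    | head :: rest =>
      have hpc := List.pairwise_cons.mp hs
      have hp : rest.Pairwise (· ≤ ·) := hpc.2
      have hle : ∀ y ∈ rest, head ≤ y := hpc.1
      rw [pvRuns]
      set run : Int := 1 + ((rest.takeWhile (fun v => v == head)).length : Int) with hrundef
      set rest' := rest.dropWhile (fun v => v == head) with hrest'
      have hs' : rest'.Pairwise (· ≤ ·) := hp.sublist (List.dropWhile_sublist _)
      have hlen' : rest'.length ≤ n := by
        have h1 : rest'.length ≤ rest.length := by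
          rw [hrest']; exact List.length_dropWhile_le _ _
        simp at hlen
        omega
      have hnm : head ∉ rest' := pv_head_not_mem_dropWhile head rest hp hle
      have heqsmem : ∀ y ∈ rest.takeWhile (fun v => v == head), y = head := by
        intro y hy
        have := List.mem_takeWhile_imp hy
        simpa using this
      have hceqs : (rest.takeWhile (fun v => v == head)).count head
          = (rest.takeWhile (fun v => v == head)).length := by
        rw [List.count_eq_length]
        intro y hy
        simp [heqsmem y hy]
      have hsplit : rest.takeWhile (fun v => v == head) ++ rest' = rest :=
        List.takeWhile_append_dropWhile
      have hchead : (((head :: rest).count head : Nat) : Int) = run := by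
        rw [← hsplit]
        have h0 : rest'.count head = 0 := List.count_eq_zero.mpr hnm
        simp [List.count_append, hceqs, h0, hrundef]
        ring
      have hA : ∀ (cond : Prop) [Decidable cond],
          (v ∈ (if cond then PySem.Set.add acc head else acc) ↔
            v ∈ acc ∨ (v = head ∧ cond)) := by
        intro cond _
        split_ifs with h
        · rw [PySem.Set.mem_add]; tauto
        · tauto
      rw [ih rest' hlen' _ hs' v, hA]
      by_cases hv : v = head
      · have hvr : ¬ (v ∈ rest' ∧ mn ≤ (rest'.count v : Int) ∧ (rest'.count v : Int) ≤ mx) :=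
          fun h => hnm (hv ▸ h.1)
        simp only [hv]
        rw [← hchead]
        have hmem : head ∈ head :: rest := List.mem_cons_self
        tauto
      · have hcv : (head :: rest).count v = rest'.count v := by
          rw [← hsplit]
          have h1 : (rest.takeWhile (fun v => v == head)).count v = 0 := by
            rw [List.count_eq_zero]
            intro h
            exact hv (heqsmem v h)
          have hhv : ¬ head = v := fun he => hv he.symm
          simp [List.count_append, h1, hhv]
        have hmv : v ∈ head :: rest ↔ v ∈ rest' := by
          constructor
          · intro h
            rcases List.mem_cons.mp h with h | h
            · exact absurd h hv
            · rw [← hsplit] at h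
              rcases List.mem_append.mp h with h | h
              · exact absurd (heqsmem v h) hv
              · exact h
          · intro h
            refine List.mem_cons_of_mem _ ?_
            rw [← hsplit]
            exact List.mem_append_right _ h
        rw [hcv]
        have hvh : ¬ (v = head ∧ (mn ≤ run ∧ run ≤ mx)) := fun h => hv h.1
        tauto

theorem mutual_string_values_eq (data : List (String × List String))
    (minimum maximum : Option Int) :
    mutual_string_values data minimum maximum = mutual_string_values_alt data minimum maximum := by
  unfold mutual_string_values mutual_string_values_alt
  simp only [pv_step_eq, pv_foldl_flat, PySem.Dict.foldl_insert_getD_add_one_eq_counter]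
  apply List.map_congr_left
  intro kv hkv
  set mn : Int := minimum.getD 2 with hmn
  set mx : Int := (match maximum with
    | some m => m
    | none => (data.length : Int) *
        ((PySem.List.max? (data.map (fun kv => (kv.2.length : Int))) (fun x => x)).getD 0) + 1) with hmx
  set all : List String := data.flatMap (fun kv => kv.2) with hall
  set pool : List String := PySem.List.sorted all (fun v => v) false with hpool
  have key : ∀ v ∈ kv.2,
      (decide (mn ≤ (PySem.Dict.counter all).getD v 0) && decide ((PySem.Dict.counter all).getD v 0 ≤ mx))
        = PySem.Set.contains (pvRuns mn mx pool PySem.Set.empty) v := by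
    intro v hv
    have hvall : v ∈ all := by
      rw [hall]
      exact List.mem_flatMap.mpr ⟨kv, hkv, hv⟩
    have hperm : pool.Perm all := PySem.List.sorted_perm all (fun v => v) false
    have hpair : pool.Pairwise (· ≤ ·) := by
      have := PySem.List.sorted_pairwise (xs := all) (key := fun v => v)
      simpa using this
    have hcnt : (PySem.Dict.counter all).getD v 0 = (all.count v : Int) :=
      PySem.Dict.getD_counter all v
    have hcp : pool.count v = all.count v := hperm.count_eq v
    have hvp : v ∈ pool := by
      rw [hpool, PySem.List.mem_sorted]
      exact hvall
    rw [Bool.eq_iff_iff]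
    simp only [Bool.and_eq_true, decide_eq_true_eq, PySem.Set.contains_iff]
    rw [pv_mem_pvRuns mn mx pool.length pool le_rfl _ hpair v, hcnt, hcp]
    simp only [PySem.Set.empty]
    constructor
    · intro h
      exact Or.inr ⟨hvp, h.1, h.2⟩
    · rintro (h | h)
      · simp at h
      · exact ⟨h.2.1, h.2.2⟩
  rw [List.filter_congr key]

-- ===== VERDICT (by name: the statement is the Claim_ definition above) =====
theorem mutual_string_values_spec : Claim_equal_mutual_string_values := by
  intro data minimum maximum _ _
  unfold Spec_mutual_string_values
  exact mutual_string_values_eq data minimum maximum
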